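-- pv_equiv track=rewrite | github.com/NilsonCesar/Nand2Tetris | nand2tetris/projects/08/VMTranslator.py | find_folder_name
-- ===== SOURCE A (Python) =====
-- def find_folder_name(dir):
--     last_slash = -1
--     third_to_last_slash = -1
--     if dir[len(dir) - 1] == "/":
--         last_slash = len(dir) - 1
--
--     if last_slash == -1:
--         for i in range(len(dir)):
--             if dir[i] == "/":
--                 last_slash = i
--         return dir[last_slash + 1:]
--     else:
--         for i in range(len(dir) - 1):
--             if dir[i] == "/":
--                 third_to_last_slash = i
--         return dir[third_to_last_slash + 1: last_slash]
-- ===== SOURCE B (Python) =====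
-- def find_folder_name(dir):
--     parts = dir.split("/")
--     return parts[-2] if dir[-1] == "/" else parts[-1]
-- ===== Notes on version B (the rewrite author's own statement) =====
-- stated objective: alternative
-- what changed: Instead of A's two index-scanning loops and branch-specific slices, B builds the list of all path components with str.split('/') once and selects the last component (or the second-to-last when the path ends in a slash), with no index arithmetic or slicing at all.
-- outside the precondition, e.g. on find_folder_name(''): A raises IndexError, B raises IndexError
import Mathlib
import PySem

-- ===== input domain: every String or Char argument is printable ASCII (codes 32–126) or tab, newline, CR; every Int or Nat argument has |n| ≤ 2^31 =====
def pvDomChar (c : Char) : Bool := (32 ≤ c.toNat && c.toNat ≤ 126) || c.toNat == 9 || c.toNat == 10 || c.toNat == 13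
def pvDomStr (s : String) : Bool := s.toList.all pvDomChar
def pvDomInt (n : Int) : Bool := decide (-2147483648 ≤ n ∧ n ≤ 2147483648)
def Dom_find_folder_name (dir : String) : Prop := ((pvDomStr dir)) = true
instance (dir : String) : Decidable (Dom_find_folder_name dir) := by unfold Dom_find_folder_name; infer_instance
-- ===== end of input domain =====

-- B replaces A's two index-scanning loops and branch-specific slices by one str.split("/")
-- that builds the component list and selects the last (or second-to-last) part; objective: alternative.


-- ===== PORT A =====
def find_folder_name (dir : String) : String :=
  let n : Int := PySem.Str.len dir
  match PySem.Str.pyGet? dir (n - 1) with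
  | none => ""   -- dir[len(dir)-1] raises IndexError on the empty string (excluded by Pre_)
  | some c =>
    let last_slash : Int := if c = '/' then n - 1 else -1
    if last_slash = -1 then
      let ls := (PySem.List.pyRange 0 n 1).foldl
        (fun ls i => if PySem.Str.pyGet? dir i = some '/' then i else ls) (-1)
      PySem.Str.slice dir (some (ls + 1)) none
    else
      let t3 := (PySem.List.pyRange 0 (n - 1) 1).foldl
        (fun t3 i => if PySem.Str.pyGet? dir i = some '/' then i else t3) (-1)
      PySem.Str.slice dir (some (t3 + 1)) (some last_slash)

-- ===== PORT B =====
def find_folder_name_alt (dir : String) : String :=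
  let parts : List (List Char) := PySem.Chars.splitOn dir.toList ['/']   -- dir.split("/"), sep non-empty
  match PySem.Str.pyGet? dir (-1) with
  | none => ""   -- dir[-1] raises IndexError on the empty string (excluded by Pre_)
  | some c =>
    if c = '/' then
      String.ofList ((PySem.List.pyGet? parts (-2)).getD [])   -- parts[-2]; in range whenever dir ends in '/'
    else
      String.ofList ((PySem.List.pyGet? parts (-1)).getD [])   -- parts[-1]; split never returns an empty list

-- ===== PRECONDITION & SPEC =====
-- Pre_ excludes only the empty string, where both A and B raise IndexError.
def Pre_find_folder_name (dir : String) : Prop := dir ≠ ""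
instance (dir : String) : Decidable (Pre_find_folder_name dir) := by unfold Pre_find_folder_name; infer_instance
def pvWitness_find_folder_name : String := "projects/08/folder/"

def Spec_find_folder_name (dir : String) (out : String) : Prop := out = find_folder_name_alt dir
instance (dir : String) (out : String) : Decidable (Spec_find_folder_name dir out) := by unfold Spec_find_folder_name; infer_instance

-- ===== CLAIM (what is proved, stated in full; the proofs are below) =====
def Claim_equal_find_folder_name : Prop := ∀ (dir : String), Dom_find_folder_name dir → Pre_find_folder_name dir → Spec_find_folder_name dir (find_folder_name dir)

-- ===== LEMMAS AND PROOFS =====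

-- reference version of single-char split, structural recursion (proofs only)
def splitSlash : List Char → List (List Char)
  | [] => [[]]
  | c :: rest => if c = '/' then [] :: splitSlash rest else (splitSlash rest).modifyHead (c :: ·)

theorem splitSlash_length_pos (cs : List Char) : 0 < (splitSlash cs).length := by
  induction cs with
  | nil => simp [splitSlash]
  | cons c rest ih =>
    by_cases hc : c = '/'
    · simp [splitSlash, hc]
    · simpa [splitSlash, hc] using ih

theorem splitSlash_ne_nil (cs : List Char) : splitSlash cs ≠ [] :=
  List.ne_nil_of_length_pos (splitSlash_length_pos cs)

theorem go_spec (fuel : Nat) (l cur : List Char) (acc : List (List Char)) (h : l.length ≤ fuel) :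
    PySem.Chars.splitOn.go ['/'] fuel l cur acc
      = acc.reverse ++ (splitSlash l).modifyHead (cur.reverse ++ ·) := by
  induction fuel generalizing l cur acc with
  | zero =>
    have hl : l = [] := List.eq_nil_of_length_eq_zero (by omega)
    subst hl
    rw [show PySem.Chars.splitOn.go ['/'] 0 [] cur acc
          = ((cur.reverse ++ ([] : List Char)) :: acc).reverse from rfl]
    simp [splitSlash, List.modifyHead]
  | succ k ih =>
    cases l with
    | nil =>
      rw [show PySem.Chars.splitOn.go ['/'] (k + 1) [] cur acc
            = (cur.reverse :: acc).reverse from rfl,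
          show splitSlash [] = [[]] from rfl]
      simp [List.modifyHead]
    | cons c rest =>
      have hpre : ['/'].isPrefixOf (c :: rest) = true ↔ c = '/' := by
        rw [List.isPrefixOf_iff_prefix, List.cons_prefix_cons]
        simp [eq_comm]
      have hlen : rest.length ≤ k := by
        simp only [List.length_cons] at h; omega
      by_cases hc : c = '/'
      · rw [show PySem.Chars.splitOn.go ['/'] (k+1) (c :: rest) cur acc
              = if ['/'].isPrefixOf (c :: rest) = true
                then PySem.Chars.splitOn.go ['/'] k (List.drop (['/'] : List Char).length (c :: rest)) [] (cur.reverse :: acc)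
                else PySem.Chars.splitOn.go ['/'] k rest (c :: cur) acc from rfl,
           if_pos (hpre.2 hc)]
        simp only [List.length_singleton, List.drop_succ_cons, List.drop_zero]
        rw [ih rest [] (cur.reverse :: acc) hlen]
        cases hs : splitSlash rest with
        | nil => exact absurd hs (splitSlash_ne_nil rest)
        | cons p ps => simp [splitSlash, hc, hs, List.modifyHead]
      · rw [show PySem.Chars.splitOn.go ['/'] (k+1) (c :: rest) cur acc
              = if ['/'].isPrefixOf (c :: rest) = true
                then PySem.Chars.splitOn.go ['/'] k (List.drop (['/'] : List Char).length (c :: rest)) [] (cur.reverse :: acc)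
                else PySem.Chars.splitOn.go ['/'] k rest (c :: cur) acc from rfl,
           if_neg (fun hx => hc (hpre.1 hx))]
        rw [ih rest (c :: cur) acc hlen]
        cases hs : splitSlash rest with
        | nil => exact absurd hs (splitSlash_ne_nil rest)
        | cons p ps => simp [splitSlash, hc, hs, List.modifyHead]

theorem splitOn_eq_splitSlash (cs : List Char) :
    PySem.Chars.splitOn cs ['/'] = splitSlash cs := by
  rw [PySem.Chars.splitOn, go_spec (cs.length + 1) cs [] [] (by omega)]
  cases hs : splitSlash cs with
  | nil => exact absurd hs (splitSlash_ne_nil cs)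
  | cons p ps => simp [List.modifyHead]

theorem splitSlash_no_slash (cs : List Char) (h : '/' ∉ cs) : splitSlash cs = [cs] := by
  induction cs with
  | nil => rfl
  | cons c rest ih =>
    simp only [List.mem_cons, not_or] at h
    simp [splitSlash, if_neg (Ne.symm h.1), ih h.2, List.modifyHead]

theorem modifyHead_append_left (f : List Char → List Char) (l l' : List (List Char)) (h : l ≠ []) :
    (l ++ l').modifyHead f = l.modifyHead f ++ l' := by
  cases l with
  | nil => exact absurd rfl h
  | cons x xs => simp [List.modifyHead]

theorem splitSlash_append (xs ys : List Char) :
    splitSlash (xs ++ '/' :: ys) = splitSlash xs ++ splitSlash ys := by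
  induction xs with
  | nil => simp [splitSlash]
  | cons c xs ih =>
    by_cases hc : c = '/'
    · subst hc; simp [splitSlash, ih]
    · simp only [List.cons_append, splitSlash, if_neg hc, ih]
      rw [modifyHead_append_left _ _ _ (splitSlash_ne_nil xs)]

-- decomposition of a list at its LAST slash
theorem last_slash_decomp (cs : List Char) (h : '/' ∈ cs) :
    ∃ xs ys, cs = xs ++ '/' :: ys ∧ '/' ∉ ys := by
  induction cs using List.reverseRecOn with
  | nil => simp at h
  | append_singleton l c ih =>
    by_cases hc : c = '/'
    · exact ⟨l, [], by simp [hc], by simp⟩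
    · have hl : '/' ∈ l := by
        rcases List.mem_append.1 h with h' | h'
        · exact h'
        · simp at h'; exact absurd h'.symm hc
      obtain ⟨xs, ys, h1, h2⟩ := ih hl
      refine ⟨xs, ys ++ [c], by rw [h1]; simp, ?_⟩
      intro hm
      rcases List.mem_append.1 hm with h' | h'
      · exact h2 h'
      · simp at h'; exact hc h'.symm

-- the last-slash-index fold of A, on lists
def lastIdxFold (cs : List Char) : Int :=
  (PySem.List.pyRange 0 (cs.length : Int) 1).foldl
    (fun t i => if PySem.List.pyGet? cs i = some '/' then i else t) (-1)

theorem lastIdxFold_append_singleton (l : List Char) (c : Char) :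
    lastIdxFold (l ++ [c]) = if c = '/' then (l.length : Int) else lastIdxFold l := by
  unfold lastIdxFold
  rw [show (((l ++ [c]).length : Nat) : Int) = (l.length : Int) + 1 by
        simp only [List.length_append, List.length_singleton]; omega,
      PySem.List.pyRange_one_succ_right (by positivity), List.foldl_append]
  simp only [List.foldl_cons, List.foldl_nil]
  rw [PySem.List.foldl_congr_mem _ _
        (fun t i => if PySem.List.pyGet? l i = some '/' then i else t) _
        (by
          intro acc x hx
          obtain ⟨hx0, hx1⟩ := PySem.List.mem_pyRange_one.1 hx
          have hgx : PySem.List.pyGet? (l ++ [c]) x = PySem.List.pyGet? l x := by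
            rw [PySem.List.pyGet?_of_nonneg _ hx0, PySem.List.pyGet?_of_nonneg _ hx0,
                List.getElem?_append_left (by omega)]
          simp only [hgx])]
  rw [show PySem.List.pyGet? (l ++ [c]) (l.length : Int) = (l ++ [c])[l.length]? from
        PySem.List.pyGet?_natCast _ _]
  rw [List.getElem?_append_right (le_refl l.length)]
  simp only [Nat.sub_self, List.getElem?_cons_zero, Option.some.injEq]

theorem lastIdxFold_no_slash (cs : List Char) (h : '/' ∉ cs) : lastIdxFold cs = -1 := by
  induction cs using List.reverseRecOn with
  | nil => rfl
  | append_singleton l c ih =>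
    have hc : c ≠ '/' := fun hc => h (by simp [hc])
    have hl : '/' ∉ l := fun hm => h (by simp [hm])
    rw [lastIdxFold_append_singleton, if_neg hc, ih hl]

theorem lastIdxFold_last (xs ys : List Char) (h : '/' ∉ ys) :
    lastIdxFold (xs ++ '/' :: ys) = (xs.length : Int) := by
  induction ys using List.reverseRecOn with
  | nil => rw [lastIdxFold_append_singleton, if_pos rfl]
  | append_singleton l c ih =>
    have hc : c ≠ '/' := fun hc => h (by simp [hc])
    have hl : '/' ∉ l := fun hm => h (by simp [hm])
    rw [show xs ++ '/' :: (l ++ [c]) = (xs ++ '/' :: l) ++ [c] by simp,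
        lastIdxFold_append_singleton, if_neg hc, ih hl]

theorem find_folder_name_agree (dir : String) (h : dir ≠ "") :
    find_folder_name dir = find_folder_name_alt dir := by
  have hne : dir.toList ≠ [] := fun hc => h (by
    have := congrArg String.ofList hc
    simpa using this)
  have hlen : 1 ≤ dir.toList.length := List.length_pos_of_ne_nil hne
  have hn : PySem.Str.len dir = (dir.toList.length : Int) := rfl
  obtain ⟨c, hc⟩ : ∃ c, dir.toList.getLast? = some c := by
    cases hgl : dir.toList.getLast? with
    | none => exact absurd (List.getLast?_eq_none_iff.1 hgl) hne
    | some c => exact ⟨c, rfl⟩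
  have hA : PySem.Str.pyGet? dir (PySem.Str.len dir - 1) = some c := by
    rw [PySem.Str.pyGet?, PySem.Str.len,
        show ((dir.toList.length : Int) - 1) = ((dir.toList.length - 1 : Nat) : Int) by omega,
        show PySem.Chars.pyGet? dir.toList _ = _ from PySem.List.pyGet?_natCast _ _,
        ← List.getLast?_eq_getElem?, hc]
  have hB : PySem.Str.pyGet? dir (-1) = some c := by
    rw [PySem.Str.pyGet?, show PySem.Chars.pyGet? dir.toList (-1) = _ from
      PySem.List.pyGet?_neg_one _, hc]
  have hsplit : PySem.Chars.splitOn dir.toList ['/'] = splitSlash dir.toList :=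
    splitOn_eq_splitSlash dir.toList
  by_cases hcslash : c = '/'
  · -- trailing slash: A's second loop scans dir[:-1]; B takes parts[-2]
    have hls : ¬ (PySem.Str.len dir - 1 = -1) := by rw [hn]; omega
    obtain ⟨ds, hds⟩ : ∃ ds, dir.toList = ds ++ ['/'] := by
      obtain ⟨ds, hds⟩ := List.getLast?_eq_some_iff.mp hc
      exact ⟨ds, by rw [hds, hcslash]⟩
    have hdl : dir.toList.length = ds.length + 1 := by rw [hds]; simp
    have hfold : (PySem.List.pyRange 0 (PySem.Str.len dir - 1) 1).foldl
        (fun t i => if PySem.Str.pyGet? dir i = some '/' then i else t) (-1)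
        = lastIdxFold ds := by
      rw [PySem.List.foldl_congr_mem _ _
            (fun t i => if PySem.List.pyGet? ds i = some '/' then i else t) _
            (by
              intro acc x hx
              obtain ⟨hx0, hx1⟩ := PySem.List.mem_pyRange_one.1 hx
              rw [hn] at hx1
              have hgx : PySem.Str.pyGet? dir x = PySem.List.pyGet? ds x := by
                show PySem.List.pyGet? dir.toList x = _
                rw [PySem.List.pyGet?_of_nonneg _ hx0, PySem.List.pyGet?_of_nonneg _ hx0, hds,
                    List.getElem?_append_left (by omega)]
              simp only [hgx])]
      unfold lastIdxFold
      rw [show PySem.Str.len dir - 1 = ((ds.length : Nat) : Int) by rw [hn, hdl]; push_cast; ring]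
    by_cases hmem : '/' ∈ ds
    · obtain ⟨xs, ys, h1, h2⟩ := last_slash_decomp ds hmem
      have hdlen : ds.length = xs.length + 1 + ys.length := by
        have := congrArg List.length h1
        simp at this
        omega
      have ht3 : lastIdxFold ds = (xs.length : Int) := by rw [h1]; exact lastIdxFold_last xs ys h2
      have hAval : PySem.Str.slice dir (some (lastIdxFold ds + 1)) (some (PySem.Str.len dir - 1))
          = String.ofList ys := by
        rw [PySem.Str.slice, ht3, hn]
        congr 1
        rw [show PySem.Chars.slice dir.toList _ _ = _ from PySem.Chars.slice_eq_listSlice _ _ _,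
            PySem.List.slice_of_nonneg _ (by positivity) (by omega) (by omega) (by omega)]
        rw [show ((xs.length : Int) + 1).toNat = xs.length + 1 by omega,
            show ((dir.toList.length : Int) - 1).toNat = ds.length by omega,
            ← List.drop_take, hds, List.take_left, h1,
            show xs ++ '/' :: ys = (xs ++ ['/']) ++ ys by simp,
            show xs.length + 1 = (xs ++ ['/']).length by simp,
            List.drop_left]
      have hBval : (PySem.List.pyGet? (splitSlash dir.toList) (-2)).getD [] = ys := by
        have hparts : splitSlash dir.toList = splitSlash xs ++ [ys, []] := by
          rw [hds, h1, show (xs ++ '/' :: ys) ++ ['/'] = xs ++ '/' :: (ys ++ '/' :: []) by simp,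
              splitSlash_append, splitSlash_append, splitSlash_no_slash ys h2]
          simp [splitSlash]
        have hL : (splitSlash xs ++ [ys, []]).length = (splitSlash xs).length + 2 := by simp
        rw [hparts, PySem.List.pyGet?_neg _ (by norm_num) (by rw [hL]; push_cast; omega),
            show ((-(-2 : Int)).toNat) = 2 from rfl, hL, Nat.add_sub_cancel,
            List.getElem?_append_right (le_refl _), Nat.sub_self]
        rfl
      simp only [find_folder_name, find_folder_name_alt, hA, hB, if_pos hcslash, if_neg hls,
        hfold, hsplit, hAval, hBval]
    · have ht3 : lastIdxFold ds = -1 := lastIdxFold_no_slash ds hmem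
      have hAval : PySem.Str.slice dir (some (lastIdxFold ds + 1)) (some (PySem.Str.len dir - 1))
          = String.ofList ds := by
        rw [PySem.Str.slice, ht3, hn, show (-1 : Int) + 1 = 0 by norm_num]
        congr 1
        rw [show PySem.Chars.slice dir.toList _ _ = _ from PySem.Chars.slice_eq_listSlice _ _ _,
            PySem.List.slice_of_nonneg _ (le_refl 0) (by omega) (by omega) (by omega)]
        simp only [Int.toNat_zero, List.drop_zero, Nat.sub_zero]
        rw [show ((dir.toList.length : Int) - 1).toNat = ds.length by omega, hds, List.take_left]
      have hBval : (PySem.List.pyGet? (splitSlash dir.toList) (-2)).getD [] = ds := by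
        have hparts : splitSlash dir.toList = [ds, []] := by
          rw [hds, show ds ++ ['/'] = ds ++ '/' :: [] by simp, splitSlash_append,
              splitSlash_no_slash ds hmem]
          simp [splitSlash]
        rw [hparts, PySem.List.pyGet?_neg _ (by norm_num) (by norm_num)]
        rfl
      simp only [find_folder_name, find_folder_name_alt, hA, hB, if_pos hcslash, if_neg hls,
        hfold, hsplit, hAval, hBval]
  · -- no trailing slash: A's first loop scans all of dir; B takes parts[-1]
    have hfold : (PySem.List.pyRange 0 (PySem.Str.len dir) 1).foldl
        (fun t i => if PySem.Str.pyGet? dir i = some '/' then i else t) (-1)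
        = lastIdxFold dir.toList := by rw [hn]; rfl
    by_cases hmem : '/' ∈ dir.toList
    · obtain ⟨xs, ys, h1, h2⟩ := last_slash_decomp dir.toList hmem
      have hls : lastIdxFold dir.toList = (xs.length : Int) := by
        rw [h1]; exact lastIdxFold_last xs ys h2
      have hAval : PySem.Str.slice dir (some (lastIdxFold dir.toList + 1)) none
          = String.ofList ys := by
        rw [PySem.Str.slice, hls]
        congr 1
        rw [show PySem.Chars.slice dir.toList _ _ = _ from PySem.Chars.slice_eq_listSlice _ _ _,
            PySem.List.slice_from _ (by positivity),
            show ((xs.length : Int) + 1).toNat = xs.length + 1 by omega, h1,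
            show xs ++ '/' :: ys = (xs ++ ['/']) ++ ys by simp,
            show xs.length + 1 = (xs ++ ['/']).length by simp,
            List.drop_left]
      have hBval : (PySem.List.pyGet? (splitSlash dir.toList) (-1)).getD [] = ys := by
        rw [h1, splitSlash_append, splitSlash_no_slash ys h2,
            PySem.List.pyGet?_neg_one_append_singleton]
        rfl
      simp only [find_folder_name, find_folder_name_alt, hA, hB, if_neg hcslash, if_true,
        hfold, hsplit, hAval, hBval]
    · have hls : lastIdxFold dir.toList = -1 := lastIdxFold_no_slash dir.toList hmem
      have hAval : PySem.Str.slice dir (some (lastIdxFold dir.toList + 1)) none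
          = String.ofList dir.toList := by
        rw [PySem.Str.slice, hls, show (-1 : Int) + 1 = 0 by norm_num]
        congr 1
        rw [show PySem.Chars.slice dir.toList _ _ = _ from PySem.Chars.slice_eq_listSlice _ _ _,
            PySem.List.slice_from _ (le_refl 0)]
        simp
      have hBval : (PySem.List.pyGet? (splitSlash dir.toList) (-1)).getD [] = dir.toList := by
        rw [splitSlash_no_slash dir.toList hmem, PySem.List.pyGet?_neg_one]
        rfl
      simp only [find_folder_name, find_folder_name_alt, hA, hB, if_neg hcslash, if_true,
        hfold, hsplit, hAval, hBval]

-- ===== VERDICT (by name: the statement is the Claim_ definition above) =====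
theorem find_folder_name_spec : Claim_equal_find_folder_name := by
  intro dir _ hpre
  exact find_folder_name_agree dir hpre
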